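-- pv_equiv track=rewrite | github.com/miliar/Code_Jam_Webscraper | Solutions_python/Problem_190/160.py | makeTournament
-- ===== SOURCE A (Python) =====
-- def makeTournament(n,letters):
--     ''' letters as [(num1, let1) num2, num3), (let1, let2, let3)]'''
--     sortedLetters = sorted(letters)
--     sortedLetters.reverse()
--     #print sortedLetters
--     n1 = sortedLetters[0][0]
--     l1 = sortedLetters[0][1]
--     n2 = sortedLetters[1][0]
--     l2 = sortedLetters[1][1]
--     n3 = sortedLetters[2][0]
--     l3 = sortedLetters[2][1]
--     if min([n1,n2,n3]) < 0:
--         return None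
--     if n == 1:
--         if n1 != 2:
--             sortedTourney = sorted([l1] + [l2])
--             return sortedTourney[0]+sortedTourney[1]
--         else:
--             return None
--     else:
--         dist = getDistribution(n-1)
--
--         t1 = makeTournament(n-1, [(dist[0], l1), (dist[1], l2), (dist[2], l3)])
--         remainingLetters = [(n1-dist[0], l1), (n2-dist[1], l2), (n3-dist[2], l3)]
--         t2 = makeTournament(n-1, sorted(remainingLetters))
--         if t1 and t2 and t1 != t2:
--             if t1 < t2:
--                 return t1 + t2
--             else:
--                 return t2 + t1
--
-- def getDistribution(n):
--     x = [0,0,0]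
--     c = 0
--     while c < 2**n:
--         x[c%3] += 1
--         c += 1
--     return x
-- ===== SOURCE B (Python) =====
-- def makeTournament(n, letters):
--     return _tourney(n, sorted(letters))
--
--
-- def _tourney(n, s):
--     n1, l1 = s[-1]
--     n2, l2 = s[-2]
--     n3, l3 = s[-3]
--     if n1 < 0 or n2 < 0 or n3 < 0:
--         return None
--     if n == 1:
--         return None if n1 == 2 else min(l1, l2) + max(l1, l2)
--     half = 2 ** (n - 1)
--     q = half // 3
--     r = half % 3
--     d1 = q + 1 if r > 0 else q
--     d2 = q + 1 if r == 2 else q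
--     t1 = _tourney(n - 1, sorted([(d1, l1), (d2, l2), (q, l3)]))
--     t2 = _tourney(n - 1, sorted([(n1 - d1, l1), (n2 - d2, l2), (n3 - q, l3)]))
--     if t1 and t2 and t1 != t2:
--         return min(t1, t2) + max(t1, t2)
--     return None
-- ===== Notes on version B (the rewrite author's own statement) =====
-- stated objective: alternative
-- what changed: B replaces A's getDistribution, which counts 2**(n-1) loop iterations cyclically mod 3, by closed-form arithmetic (q = 2**(n-1)//3 plus the remainder's contribution to the first residues), sorts once ascending and reads the top three entries via s[-1..-3] instead of sort-then-reverse, drops the redundant re-sort of the remaining letters before the recursive call, and joins the two halves with min/max instead of if/else chains; both programs remain bound by the exponential output size, so the measured speed-up is not claimed.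
import Mathlib
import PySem

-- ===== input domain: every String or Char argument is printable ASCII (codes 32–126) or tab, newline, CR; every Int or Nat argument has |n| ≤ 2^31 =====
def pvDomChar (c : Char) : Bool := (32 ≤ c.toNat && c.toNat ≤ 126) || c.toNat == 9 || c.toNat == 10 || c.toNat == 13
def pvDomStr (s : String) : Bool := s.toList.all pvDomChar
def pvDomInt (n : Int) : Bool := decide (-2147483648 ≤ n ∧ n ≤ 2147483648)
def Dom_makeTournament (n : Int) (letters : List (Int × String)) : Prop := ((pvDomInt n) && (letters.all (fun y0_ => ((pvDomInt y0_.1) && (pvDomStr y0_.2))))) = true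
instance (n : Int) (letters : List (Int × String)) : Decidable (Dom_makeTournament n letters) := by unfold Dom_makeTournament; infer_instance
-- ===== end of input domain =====

-- B replaces A's 2^(n-1)-iteration counting loop getDistribution by closed-form arithmetic on
-- 2^(n-1) (// 3 and % 3), sorts once ascending (reading the top three via s[-1..-3]) instead of
-- sort-then-reverse, skips the redundant re-sort before the second recursive call, and joins
-- halves with min/max; objective: alternative (both remain bound by the exponential output size).

-- ===== PORT A =====
-- A's getDistribution(n): x=[0,0,0]; c counts 0..2**n-1, x[c%3] += 1.
-- (exponent ported as (n).toNat: A is only called with n-1 ≥ 1 inside Pre_; for n ≤ 0 Python's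
-- 2**n is a float and the surrounding recursion diverges — those inputs are outside Pre_.)
def pvGetDistribution (n : Int) : List Int :=
  (List.range (2 ^ n.toNat)).foldl
    (fun (x : List Int) (c : Nat) =>
      PySem.List.pySetD x (PySem.Int.mod (c : Int) 3)
        (PySem.List.pyGetD x (PySem.Int.mod (c : Int) 3) 0 + 1))
    [0, 0, 0]

-- A's recursion, with a fuel argument (= n.toNat at top level): Python recurses on n-1 and
-- terminates for every n ≥ 1; for n ≤ 0 it diverges (outside Pre_), where fuel 0 returns none.
def pvMkA : Nat → Int → List (Int × String) → Option String
  | fuel, n, letters =>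
    let sortedLetters := (PySem.List.sorted2 letters Prod.fst Prod.snd).reverse
    match PySem.List.pyGet? sortedLetters 0, PySem.List.pyGet? sortedLetters 1,
          PySem.List.pyGet? sortedLetters 2 with
    | some p0, some p1, some p2 =>
      let n1 := p0.1; let l1 := p0.2
      let n2 := p1.1; let l2 := p1.2
      let n3 := p2.1; let l3 := p2.2
      if min (min n1 n2) n3 < 0 then none
      else if n = 1 then
        if n1 ≠ 2 then
          let sortedTourney := PySem.List.sorted ([l1] ++ [l2]) (fun x => x)
          some (PySem.List.pyGetD sortedTourney 0 "" ++ PySem.List.pyGetD sortedTourney 1 "")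
        else none
      else
        match fuel with
        | 0 => none  -- only reachable for n ≤ 0, where Python diverges (outside Pre_)
        | fuel' + 1 =>
          let dist := pvGetDistribution (n - 1)
          let d0 := PySem.List.pyGetD dist 0 0
          let d1 := PySem.List.pyGetD dist 1 0
          let d2 := PySem.List.pyGetD dist 2 0
          let t1 := pvMkA fuel' (n - 1) [(d0, l1), (d1, l2), (d2, l3)]
          let remainingLetters := [(n1 - d0, l1), (n2 - d1, l2), (n3 - d2, l3)]
          let t2 := pvMkA fuel' (n - 1) (PySem.List.sorted2 remainingLetters Prod.fst Prod.snd)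
          match t1, t2 with
          | some s1, some s2 =>
            if s1 ≠ "" ∧ s2 ≠ "" ∧ s1 ≠ s2 then
              if s1 < s2 then some (s1 ++ s2) else some (s2 ++ s1)
            else none
          | _, _ => none
    | _, _, _ => none  -- IndexError: fewer than 3 letters (outside Pre_)

def makeTournament (n : Int) (letters : List (Int × String)) : Option String :=
  pvMkA n.toNat n letters

-- ===== PORT B =====
-- Source B's _tourney(n, s) on the (ascending-)sorted list s, same fuel scheme as A's port;
-- 2**(n-1) is ported as 2 ^ (n-1).toNat (exact for n ≥ 1; n ≤ 0 diverges, outside Pre_).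
def pvTourney : Nat → Int → List (Int × String) → Option String
  | fuel, n, s =>
    match PySem.List.pyGet? s (-1), PySem.List.pyGet? s (-2), PySem.List.pyGet? s (-3) with
    | some (n1, l1), some (n2, l2), some (n3, l3) =>
      if n1 < 0 ∨ n2 < 0 ∨ n3 < 0 then none
      else if n = 1 then
        if n1 = 2 then none else some (min l1 l2 ++ max l1 l2)
      else
        match fuel with
        | 0 => none  -- only reachable for n ≤ 0, where Python diverges (outside Pre_)
        | fuel' + 1 =>
          let half : Int := 2 ^ (n - 1).toNat
          let q := PySem.Int.floordiv half 3
          let r := PySem.Int.mod half 3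
          let d1 := if r > 0 then q + 1 else q
          let d2 := if r = 2 then q + 1 else q
          let t1 := pvTourney fuel' (n - 1)
            (PySem.List.sorted2 [(d1, l1), (d2, l2), (q, l3)] Prod.fst Prod.snd)
          let t2 := pvTourney fuel' (n - 1)
            (PySem.List.sorted2 [(n1 - d1, l1), (n2 - d2, l2), (n3 - q, l3)] Prod.fst Prod.snd)
          match t1, t2 with
          | some s1, some s2 =>
            if s1 ≠ "" ∧ s2 ≠ "" ∧ s1 ≠ s2 then some (min s1 s2 ++ max s1 s2) else none
          | _, _ => none
    | _, _, _ => none  -- IndexError: fewer than 3 letters (outside Pre_)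

def makeTournament_alt (n : Int) (letters : List (Int × String)) : Option String :=
  pvTourney n.toNat n (PySem.List.sorted2 letters Prod.fst Prod.snd)

-- ===== PRECONDITION & SPEC =====
-- Pre_ excludes the inputs on which Python A does not return a value: fewer than 3 letters
-- (IndexError), and n ≤ 0 with at least 3 non-negative counts (unbounded recursion).
def Pre_makeTournament (n : Int) (letters : List (Int × String)) : Prop :=
  3 ≤ letters.length ∧ (1 ≤ n ∨ (letters.filter (fun p => 0 ≤ p.1)).length < 3)
instance (n : Int) (letters : List (Int × String)) : Decidable (Pre_makeTournament n letters) := by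
  unfold Pre_makeTournament; infer_instance

def pvWitness_makeTournament : Int × (List (Int × String)) :=
  (2, [(2, "a"), (1, "b"), (1, "c")])

def Spec_makeTournament (n : Int) (letters : List (Int × String)) (out : Option String) : Prop := out = makeTournament_alt n letters
instance (n : Int) (letters : List (Int × String)) (out : Option String) : Decidable (Spec_makeTournament n letters out) := by unfold Spec_makeTournament; infer_instance

-- ===== CLAIM (what is proved, stated in full; the proofs are below) =====
def Claim_equal_makeTournament : Prop := ∀ (n : Int) (letters : List (Int × String)), Dom_makeTournament n letters → Pre_makeTournament n letters → Spec_makeTournament n letters (makeTournament n letters)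

-- ===== LEMMAS AND PROOFS =====

-- the strict comparator sorted2 … Prod.fst Prod.snd uses (Python's lexicographic tuple '<')
def pvLt (a b : Int × String) : Bool :=
  decide (a.1 < b.1) || (!decide (b.1 < a.1) && decide (a.2 < b.2))

theorem pvLt_iff {a b : Int × String} :
    pvLt a b = true ↔ (a.1 < b.1 ∨ (a.1 = b.1 ∧ a.2 < b.2)) := by
  rcases lt_trichotomy a.1 b.1 with h | h | h
  · simp [pvLt, h]
  · simp [pvLt, h]
  · simp [pvLt, lt_asymm h, ne_of_gt h, h]

theorem pvLt_false_iff {a b : Int × String} :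
    pvLt a b = false ↔ (b.1 < a.1 ∨ (a.1 = b.1 ∧ ¬(a.2 < b.2))) := by
  rcases lt_trichotomy a.1 b.1 with h | h | h
  · simp [pvLt, h, lt_asymm h, ne_of_lt h]
  · simp [pvLt, h]
  · simp [pvLt, lt_asymm h, ne_of_gt h, h]

theorem pvLt_trans {a b c : Int × String} (h1 : pvLt a b = true) (h2 : pvLt b c = true) :
    pvLt a c = true := by
  rw [pvLt_iff] at *
  rcases h1 with h1 | ⟨h1a, h1b⟩ <;> rcases h2 with h2 | ⟨h2a, h2b⟩
  · exact Or.inl (h1.trans h2)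
  · exact Or.inl (h2a ▸ h1)
  · exact Or.inl (h1a ▸ h2)
  · exact Or.inr ⟨h1a.trans h2a, h1b.trans h2b⟩

theorem pvLt_asymm {a b : Int × String} (h : pvLt a b = true) : pvLt b a = false := by
  rw [pvLt_iff] at h; rw [pvLt_false_iff]
  rcases h with h | ⟨h1, h2⟩
  · exact Or.inl h
  · exact Or.inr ⟨h1.symm, lt_asymm h2⟩

theorem pvLt_antisymm {a b : Int × String} (h1 : pvLt a b = false) (h2 : pvLt b a = false) :
    a = b := by
  rw [pvLt_false_iff] at *
  rcases h1 with h1 | ⟨h1a, h1b⟩ <;> rcases h2 with h2 | ⟨h2a, h2b⟩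
  · exact absurd h1 (lt_asymm h2)
  · exact absurd h1 (h2a ▸ lt_irrefl _)
  · exact absurd h2 (h1a ▸ lt_irrefl _)
  · exact Prod.ext h1a (le_antisymm (le_of_not_gt h2b) (le_of_not_gt h1b))

-- pairwise order of the insertion sort, for the non-strict relation ¬(b < a)
theorem pvInsertBy_pairwise (x : Int × String) (ys : List (Int × String))
    (h : ys.Pairwise (fun a b => pvLt b a = false)) :
    (PySem.List.insertBy pvLt x ys).Pairwise (fun a b => pvLt b a = false) := by
  induction ys with
  | nil => simp [PySem.List.insertBy]
  | cons y ys ih =>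
    rw [List.pairwise_cons] at h
    obtain ⟨hy, hys⟩ := h
    by_cases hb : pvLt x y = true
    · rw [show PySem.List.insertBy pvLt x (y :: ys) = x :: y :: ys from by
        simp [PySem.List.insertBy, hb]]
      refine List.Pairwise.cons ?_ (List.Pairwise.cons hy hys)
      intro z hz
      rcases hz with _ | hz
      · exact pvLt_asymm hb
      · rename_i hz
        cases hzx : pvLt z x with
        | false => rfl
        | true => exact absurd (pvLt_trans hzx hb) (by simp [hy z hz])
    · rw [show PySem.List.insertBy pvLt x (y :: ys) = y :: PySem.List.insertBy pvLt x ys from by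
        simp [PySem.List.insertBy, hb]]
      refine List.Pairwise.cons ?_ (ih hys)
      intro z hz
      rw [PySem.List.mem_insertBy] at hz
      rcases hz with rfl | hz
      · exact Bool.not_eq_true _ ▸ hb
      · exact hy z hz

theorem pvSorted2_pairwise (xs : List (Int × String)) :
    (PySem.List.sorted2 xs Prod.fst Prod.snd).Pairwise (fun a b => pvLt b a = false) := by
  show (xs.foldl (fun acc x => PySem.List.insertBy pvLt x acc) []).Pairwise _
  suffices h : ∀ acc, acc.Pairwise (fun a b : Int × String => pvLt b a = false) →
      (xs.foldl (fun acc x => PySem.List.insertBy pvLt x acc) acc).Pairwise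
        (fun a b => pvLt b a = false) from h [] (by simp)
  induction xs with
  | nil => intro acc h; simpa using h
  | cons x xs ih => intro acc h; exact ih _ (pvInsertBy_pairwise x acc h)

-- sorting an already sorted list changes nothing (sorted(sorted(xs)) == sorted(xs))
theorem pvSorted2_idem (xs : List (Int × String)) :
    PySem.List.sorted2 (PySem.List.sorted2 xs Prod.fst Prod.snd) Prod.fst Prod.snd
      = PySem.List.sorted2 xs Prod.fst Prod.snd :=
  List.Perm.eq_of_pairwise (fun _ _ _ _ hab hba => pvLt_antisymm hba hab)
    (pvSorted2_pairwise _) (pvSorted2_pairwise _) (PySem.List.sorted2_perm _ _ _ _)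

-- reading the reversed list at k ≥ 0 = reading the list at -k-1
theorem pvGet?_reverse_nonneg {α : Type} (l : List α) (k : Nat) :
    PySem.List.pyGet? l.reverse (k : Int) = PySem.List.pyGet? l (-(k : Int) - 1) := by
  simp only [PySem.List.pyGet?, PySem.List.pyIdx?, List.length_reverse]
  by_cases hk : k < l.length
  · rw [if_pos (by positivity), if_pos (by exact_mod_cast hk), if_neg (by omega),
      if_pos (by omega)]
    simp only [Option.bind_some, Int.toNat_natCast]
    rw [show (-(-(k : Int) - 1)).toNat = k + 1 from by omega,
      show l.length - (k + 1) = l.length - 1 - k from by omega]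
    exact List.getElem?_reverse hk
  · rw [if_pos (by positivity), if_neg (by omega), if_neg (by omega), if_neg (by omega)]
    rfl

-- closed form of A's counting loop: residue counts of 0..N-1 mod 3
theorem pvDistLoop_closed (N : Nat) :
    (List.range N).foldl
      (fun (x : List Int) (c : Nat) =>
        PySem.List.pySetD x (PySem.Int.mod (c : Int) 3)
          (PySem.List.pyGetD x (PySem.Int.mod (c : Int) 3) 0 + 1))
      [0, 0, 0]
    = [(((N + 2) / 3 : Nat) : Int), (((N + 1) / 3 : Nat) : Int), ((N / 3 : Nat) : Int)] := by
  induction N with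
  | zero => simp
  | succ N ih =>
    rw [List.range_succ, List.foldl_append, ih]
    simp only [List.foldl_cons, List.foldl_nil]
    rw [show (3 : Int) = ((3 : Nat) : Int) from rfl, PySem.Int.mod_natCast]
    have h3 : N % 3 = 0 ∨ N % 3 = 1 ∨ N % 3 = 2 := by omega
    rcases h3 with h | h | h <;>
      · rw [h]
        simp only [PySem.List.pySetD_natCast, PySem.List.pyGetD_natCast, List.set, List.getD,
          List.getElem?_cons_zero, List.getElem?_cons_succ, Option.getD_some]
        simp only [List.cons.injEq, and_true]
        omega

-- A's two-string sort = min/max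
theorem pvSortedPair (a b : String) :
    PySem.List.sorted ([a] ++ [b]) (fun x => x) = if a ≤ b then [a, b] else [b, a] := by
  by_cases h : a ≤ b
  · rw [if_pos h]
    exact PySem.List.sorted_id_eq_of_perm_of_pairwise _ _ (List.Perm.refl _)
      (by simp [String.le_iff_toList_le.mp h])
  · rw [if_neg h]
    exact PySem.List.sorted_id_eq_of_perm_of_pairwise _ _ (List.Perm.swap _ _ _)
      (by simp [String.le_iff_toList_le.mp (le_of_lt (lt_of_not_ge h))])

-- indexing literal two/three element lists
theorem pvGetD1 {α : Type} (u v : α) (d : α) : PySem.List.pyGetD [u, v] (1 : Int) d = v := by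
  rw [show (1 : Int) = ((1 : Nat) : Int) from rfl, PySem.List.pyGetD_natCast]; rfl

theorem pvGetD1' {α : Type} (u v w : α) (d : α) :
    PySem.List.pyGetD [u, v, w] (1 : Int) d = v := by
  rw [show (1 : Int) = ((1 : Nat) : Int) from rfl, PySem.List.pyGetD_natCast]; rfl

theorem pvGetD2' {α : Type} (u v w : α) (d : α) :
    PySem.List.pyGetD [u, v, w] (2 : Int) d = w := by
  rw [show (2 : Int) = ((2 : Nat) : Int) from rfl, PySem.List.pyGetD_natCast]; rfl

-- main induction: A's recursion equals B's recursion on the sorted input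
theorem pvMain (fuel : Nat) (n : Int) (xs : List (Int × String)) :
    pvMkA fuel n xs = pvTourney fuel n (PySem.List.sorted2 xs Prod.fst Prod.snd) := by
  induction fuel generalizing n xs with
  | zero =>
    rw [pvMkA, pvTourney]
    have e1 := pvGet?_reverse_nonneg (PySem.List.sorted2 xs Prod.fst Prod.snd) 0
    have e2 := pvGet?_reverse_nonneg (PySem.List.sorted2 xs Prod.fst Prod.snd) 1
    have e3 := pvGet?_reverse_nonneg (PySem.List.sorted2 xs Prod.fst Prod.snd) 2
    norm_num at e1 e2 e3
    rw [e1, e2, e3]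
    rcases hp0 : PySem.List.pyGet? (PySem.List.sorted2 xs Prod.fst Prod.snd) (-1) with _ | ⟨n1, l1⟩ <;>
      rcases hp1 : PySem.List.pyGet? (PySem.List.sorted2 xs Prod.fst Prod.snd) (-2) with _ | ⟨n2, l2⟩ <;>
      rcases hp2 : PySem.List.pyGet? (PySem.List.sorted2 xs Prod.fst Prod.snd) (-3) with _ | ⟨n3, l3⟩ <;>
      try rfl
    dsimp only
    have hmm : (min (min n1 n2) n3 < 0) ↔ (n1 < 0 ∨ n2 < 0 ∨ n3 < 0) := by
      simp
    by_cases hneg : n1 < 0 ∨ n2 < 0 ∨ n3 < 0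
    · rw [if_pos (hmm.mpr hneg), if_pos hneg]
    · rw [if_neg (fun h => hneg (hmm.mp h)), if_neg hneg]
      by_cases hn1 : n = 1
      · rw [if_pos hn1, if_pos hn1, pvSortedPair]
        by_cases h2 : n1 = 2
        · rw [if_neg (by simpa using h2), if_pos h2]
        · rw [if_pos h2, if_neg h2]
          by_cases hl : l1 ≤ l2
          · rw [if_pos hl, min_eq_left hl, max_eq_right hl,
              PySem.List.pyGetD_zero_cons, pvGetD1]
          · rw [if_neg hl, min_eq_right (le_of_not_ge hl), max_eq_left (le_of_not_ge hl),
              PySem.List.pyGetD_zero_cons, pvGetD1]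
      · rw [if_neg hn1, if_neg hn1]
  | succ fuel ih =>
    rw [pvMkA, pvTourney]
    have e1 := pvGet?_reverse_nonneg (PySem.List.sorted2 xs Prod.fst Prod.snd) 0
    have e2 := pvGet?_reverse_nonneg (PySem.List.sorted2 xs Prod.fst Prod.snd) 1
    have e3 := pvGet?_reverse_nonneg (PySem.List.sorted2 xs Prod.fst Prod.snd) 2
    norm_num at e1 e2 e3
    rw [e1, e2, e3]
    rcases hp0 : PySem.List.pyGet? (PySem.List.sorted2 xs Prod.fst Prod.snd) (-1) with _ | ⟨n1, l1⟩ <;>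
      rcases hp1 : PySem.List.pyGet? (PySem.List.sorted2 xs Prod.fst Prod.snd) (-2) with _ | ⟨n2, l2⟩ <;>
      rcases hp2 : PySem.List.pyGet? (PySem.List.sorted2 xs Prod.fst Prod.snd) (-3) with _ | ⟨n3, l3⟩ <;>
      try rfl
    dsimp only
    have hmm : (min (min n1 n2) n3 < 0) ↔ (n1 < 0 ∨ n2 < 0 ∨ n3 < 0) := by
      simp
    by_cases hneg : n1 < 0 ∨ n2 < 0 ∨ n3 < 0
    · rw [if_pos (hmm.mpr hneg), if_pos hneg]
    · rw [if_neg (fun h => hneg (hmm.mp h)), if_neg hneg]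
      by_cases hn1 : n = 1
      · rw [if_pos hn1, if_pos hn1, pvSortedPair]
        by_cases h2 : n1 = 2
        · rw [if_neg (by simpa using h2), if_pos h2]
        · rw [if_pos h2, if_neg h2]
          by_cases hl : l1 ≤ l2
          · rw [if_pos hl, min_eq_left hl, max_eq_right hl,
              PySem.List.pyGetD_zero_cons, pvGetD1]
          · rw [if_neg hl, min_eq_right (le_of_not_ge hl), max_eq_left (le_of_not_ge hl),
              PySem.List.pyGetD_zero_cons, pvGetD1]
      · rw [if_neg hn1, if_neg hn1]
        rw [pvGetDistribution, pvDistLoop_closed,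
          PySem.List.pyGetD_zero_cons, pvGetD1', pvGetD2']
        rw [show ((2 : Int) ^ (n - 1).toNat) = (((2 ^ (n - 1).toNat : Nat)) : Int) from by
          push_cast; ring]
        rw [show (3 : Int) = ((3 : Nat) : Int) from rfl,
          PySem.Int.floordiv_natCast, PySem.Int.mod_natCast]
        have hd1 : (if (((2 ^ (n - 1).toNat % 3 : Nat) : Int)) > 0
            then ((2 ^ (n - 1).toNat / 3 : Nat) : Int) + 1
            else ((2 ^ (n - 1).toNat / 3 : Nat) : Int))
            = (((2 ^ (n - 1).toNat + 2) / 3 : Nat) : Int) := by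
          split_ifs with h <;> omega
        have hd2 : (if (((2 ^ (n - 1).toNat % 3 : Nat) : Int)) = 2
            then ((2 ^ (n - 1).toNat / 3 : Nat) : Int) + 1
            else ((2 ^ (n - 1).toNat / 3 : Nat) : Int))
            = (((2 ^ (n - 1).toNat + 1) / 3 : Nat) : Int) := by
          split_ifs with h <;> omega
        rw [hd1, hd2, ih, ih, pvSorted2_idem]
        rcases ht1 : pvTourney fuel (n - 1)
            (PySem.List.sorted2 [((((2 ^ (n - 1).toNat + 2) / 3 : Nat) : Int), l1),
              ((((2 ^ (n - 1).toNat + 1) / 3 : Nat) : Int), l2),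
              (((2 ^ (n - 1).toNat / 3 : Nat) : Int), l3)] Prod.fst Prod.snd)
          with _ | s1 <;>
        rcases ht2 : pvTourney fuel (n - 1)
            (PySem.List.sorted2 [(n1 - (((2 ^ (n - 1).toNat + 2) / 3 : Nat) : Int), l1),
              (n2 - (((2 ^ (n - 1).toNat + 1) / 3 : Nat) : Int), l2),
              (n3 - ((2 ^ (n - 1).toNat / 3 : Nat) : Int), l3)] Prod.fst Prod.snd)
          with _ | s2 <;> try rfl
        dsimp only
        by_cases hg : s1 ≠ "" ∧ s2 ≠ "" ∧ s1 ≠ s2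
        · rw [if_pos hg, if_pos hg]
          obtain ⟨-, -, hne⟩ := hg
          rcases lt_or_gt_of_ne hne with h | h
          · rw [if_pos h, min_eq_left h.le, max_eq_right h.le]
          · rw [if_neg (lt_asymm h), min_eq_right h.le, max_eq_left h.le]
        · rw [if_neg hg, if_neg hg]

-- ===== VERDICT (by name: the statement is the Claim_ definition above) =====
theorem makeTournament_spec : Claim_equal_makeTournament := by
  intro n letters _ _
  unfold Spec_makeTournament makeTournament makeTournament_alt
  exact pvMain n.toNat n letters
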